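-- pv_equiv track=rewrite | github.com/azhartalha/Algorithms-and-Data-Structures | codeVita/acmICPC.py | RoboGame
-- ===== SOURCE A (Python) =====
-- def RoboGame(s):
--     x, y = -1, -1
--     for i in range(len(s)):
--         if s[i].isdigit():
--             if x == -1:
--                 x = i
--                 y = i + int(s[i])
--             else:
--                 tmp = int(s[i])
--                 if y >= i - tmp:
--                     return False
--                 x = i
--                 y = i + int(s[i])
--     return True
-- ===== SOURCE B (Python) =====
-- def RoboGame(s):
--     # Brute force: every digit at position i with value v claims the interval
--     # [i - v, i + v]; the string is valid iff no two claimed intervals touch.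
--     # Correct vs. the consecutive-pair check because the values are nonnegative:
--     # if any pair (p,v),(q,w) with p<q has p+v >= q-w, then some consecutive
--     # pair does too (p+v < q-w <= q+w chains).
--     ds = [(i, int(c)) for i, c in enumerate(s) if c.isdigit()]
--     return all(p + v < q - w
--                for a, (p, v) in enumerate(ds)
--                for (q, w) in ds[a + 1:])
-- ===== Notes on version B (the rewrite author's own statement) =====
-- stated objective: alternative
-- what changed: Replaces A's stateful single scan over consecutive digits (sentinel x, running reach y, early return) by a brute-force pairwise check: collect all (position, value) digit intervals and require every pair (not just consecutive ones) to be disjoint; equivalent because values are nonnegative so a pairwise overlap implies a consecutive overlap.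
import Mathlib
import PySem

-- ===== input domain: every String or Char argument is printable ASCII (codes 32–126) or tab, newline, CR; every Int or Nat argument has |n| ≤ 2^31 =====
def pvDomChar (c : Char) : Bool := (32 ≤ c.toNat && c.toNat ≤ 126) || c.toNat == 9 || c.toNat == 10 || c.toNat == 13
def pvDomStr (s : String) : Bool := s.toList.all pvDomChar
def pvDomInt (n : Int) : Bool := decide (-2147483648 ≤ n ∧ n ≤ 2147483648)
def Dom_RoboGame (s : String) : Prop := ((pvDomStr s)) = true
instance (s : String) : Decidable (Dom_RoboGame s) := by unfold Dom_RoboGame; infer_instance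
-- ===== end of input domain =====

-- B replaces A's stateful consecutive-pair scan by a brute-force all-pairs
-- interval-disjointness check over the collected digits; same result, not faster.

-- ===== PORT A =====
-- int(s[i]) for a single digit character is exactly its value, c.toNat - 48 (ASCII domain).
-- the for-loop over range(len(s)) with state (x, y) and early return:
def RoboGame_goA : List Char → Int → Int → Int → Bool
  | [], _, _, _ => true
  | c :: rest, i, x, y =>
    if PySem.Chars.isdigit c then
      if x == -1 then
        RoboGame_goA rest (i + 1) i (i + ((c.toNat : Int) - 48))
      else
        let tmp : Int := (c.toNat : Int) - 48
        if y ≥ i - tmp then false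
        else RoboGame_goA rest (i + 1) i (i + ((c.toNat : Int) - 48))
    else RoboGame_goA rest (i + 1) x y

def RoboGame (s : String) : Bool :=
  RoboGame_goA s.toList 0 (-1) (-1)

-- ===== PORT B =====
-- the comprehension: (index, value) pairs of the digit characters
def RoboGame_jumps : List Char → Int → List (Int × Int)
  | [], _ => []
  | c :: rest, i =>
    if PySem.Chars.isdigit c then (i, (c.toNat : Int) - 48) :: RoboGame_jumps rest (i + 1)
    else RoboGame_jumps rest (i + 1)

-- the nested all(...) over every pair ds[a], ds[b] with a < b:
-- the outer enumeration peels one element, ds[a+1:] is the remaining list.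
def RoboGame_chkAll : List (Int × Int) → Bool
  | [] => true
  | (p, v) :: rest =>
    rest.all (fun qw => decide (p + v < qw.1 - qw.2)) && RoboGame_chkAll rest

def RoboGame_alt (s : String) : Bool :=
  RoboGame_chkAll (RoboGame_jumps s.toList 0)

-- ===== PRECONDITION & SPEC =====
def Spec_RoboGame (s : String) (out : Bool) : Prop := out = RoboGame_alt s
instance (s : String) (out : Bool) : Decidable (Spec_RoboGame s out) := by unfold Spec_RoboGame; infer_instance

-- ===== CLAIM (what is proved, stated in full; the proofs are below) =====
def Claim_equal_RoboGame : Prop := ∀ (s : String), Dom_RoboGame s → Spec_RoboGame s (RoboGame s)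

-- ===== LEMMAS AND PROOFS =====

-- the consecutive-pair check that A's scan implements (proof-only helper)
def RoboGame_chk : List (Int × Int) → Bool
  | (p, v) :: (q, w) :: rest =>
    if p + v ≥ q - w then false else RoboGame_chk ((q, w) :: rest)
  | _ => true

-- after the first digit (at position p with value v, reach y = p + v, x = p ≥ 0),
-- A's scan agrees with the consecutive-pair check with (p, v) prepended.
theorem RoboGame_goA_eq_chk (cs : List Char) (i p v : Int) (hp : 0 ≤ p) (hi : 0 ≤ i) :
    RoboGame_goA cs i p (p + v) = RoboGame_chk ((p, v) :: RoboGame_jumps cs i) := by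
  induction cs generalizing i p v with
  | nil => simp [RoboGame_goA, RoboGame_jumps, RoboGame_chk]
  | cons c rest ih =>
    simp only [RoboGame_goA, RoboGame_jumps]
    by_cases hd : PySem.Chars.isdigit c
    · have hx : (p == -1) = false := by simp; omega
      simp only [hd, if_pos, hx, Bool.false_eq_true, if_false, RoboGame_chk]
      by_cases hge : p + v ≥ i - ((c.toNat : Int) - 48)
      · simp [hge]
      · simp only [hge, if_false]
        exact ih (i + 1) i ((c.toNat : Int) - 48) hi (by omega)
    · simp only [hd]
      exact ih (i + 1) p v hp (by omega)

-- before the first digit is seen (x = y = -1), A's scan agrees with the consecutive check.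
theorem RoboGame_goA_init (cs : List Char) (i : Int) (hi : 0 ≤ i) :
    RoboGame_goA cs i (-1) (-1) = RoboGame_chk (RoboGame_jumps cs i) := by
  induction cs generalizing i with
  | nil => simp [RoboGame_goA, RoboGame_jumps, RoboGame_chk]
  | cons c rest ih =>
    simp only [RoboGame_goA, RoboGame_jumps]
    by_cases hd : PySem.Chars.isdigit c
    · simp only [hd, if_pos, beq_self_eq_true]
      exact RoboGame_goA_eq_chk rest (i + 1) i ((c.toNat : Int) - 48) hi (by omega)
    · simp only [hd]
      exact ih (i + 1) (by omega)

-- every collected digit value is nonnegative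
theorem RoboGame_jumps_nonneg (cs : List Char) (i : Int) :
    ∀ x ∈ RoboGame_jumps cs i, 0 ≤ x.2 := by
  induction cs generalizing i with
  | nil => simp [RoboGame_jumps]
  | cons c rest ih =>
    intro x hx
    simp only [RoboGame_jumps] at hx
    by_cases hd : PySem.Chars.isdigit c
    · simp only [hd, if_pos, List.mem_cons] at hx
      rcases hx with rfl | hx
      · have : 48 ≤ c.toNat := by
          unfold PySem.Chars.isdigit at hd
          simp [Char.le_def] at hd
          exact hd.1
        simp; omega
      · exact ih (i + 1) x hx
    · simp only [hd] at hx
      exact ih (i + 1) x hx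

-- if a successful all-pairs check starts at (q, w) with 0 ≤ w, any (p, v) with
-- p + v < q - w also clears every later element.
theorem RoboGame_chkAll_mono (rest : List (Int × Int)) (p v q w : Int)
    (hw : 0 ≤ w)
    (hall : rest.all (fun qw => decide (q + w < qw.1 - qw.2)) = true)
    (hlt : p + v < q - w) :
    rest.all (fun qw => decide (p + v < qw.1 - qw.2)) = true := by
  rw [List.all_eq_true] at hall ⊢
  intro x hx
  have := hall x hx
  simp only [decide_eq_true_eq] at *
  omega

-- with nonnegative values, the consecutive check equals the all-pairs check.
theorem RoboGame_chk_eq_chkAll (l : List (Int × Int)) (h : ∀ x ∈ l, 0 ≤ x.2) :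
    RoboGame_chk l = RoboGame_chkAll l := by
  induction l with
  | nil => rfl
  | cons a l ih =>
    obtain ⟨p, v⟩ := a
    cases l with
    | nil => simp [RoboGame_chk, RoboGame_chkAll]
    | cons b rest =>
      obtain ⟨q, w⟩ := b
      have hw : 0 ≤ w := h (q, w) (by simp)
      have ih' : RoboGame_chk ((q, w) :: rest) = RoboGame_chkAll ((q, w) :: rest) :=
        ih (fun x hx => h x (List.mem_cons_of_mem _ hx))
      by_cases hge : p + v ≥ q - w
      · have : (decide (p + v < q - w)) = false := by simp; omega
        simp [RoboGame_chk, RoboGame_chkAll, hge, this]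
      · simp only [RoboGame_chk, hge, if_false, ih']
        simp only [RoboGame_chkAll]
        by_cases htail : (rest.all (fun qw => decide (q + w < qw.1 - qw.2))
            && RoboGame_chkAll rest) = true
        · have hall : (rest.all fun qw => decide (q + w < qw.1 - qw.2)) = true := by
            rw [Bool.and_eq_true] at htail; exact htail.1
          have hhead : rest.all (fun qw => decide (p + v < qw.1 - qw.2)) = true :=
            RoboGame_chkAll_mono rest p v q w hw hall (by omega)
          simp [htail, hhead, show p + v < q - w by omega]
        · simp only [Bool.not_eq_true] at htail
          simp [htail]

-- ===== VERDICT (by name: the statement is the Claim_ definition above) =====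
theorem RoboGame_spec : Claim_equal_RoboGame := by
  intro s _
  unfold Spec_RoboGame RoboGame RoboGame_alt
  rw [RoboGame_goA_init s.toList 0 (by norm_num)]
  exact RoboGame_chk_eq_chkAll _ (RoboGame_jumps_nonneg s.toList 0)
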